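-- pv_equiv track=rewrite | github.com/nbsidiki/few_exercises | retor_3.py | encode_rotor
-- ===== SOURCE A (Python) =====
-- ALPHABET = "ABCDEFGHIJKLMNOPQRSTUVWXYZ"
--
-- ROTOR1 = "EKMFLGDQVZNTOWYHXUSPAIBRCJ"
--
-- ROTOR2 = "AJDKSIRUXBLHWTMCQGZNPYFVOE"
--
-- ROTOR3 = "BDFHJLCPRTXVZNYEIWGAKMUSQO"
--
-- def encode_letter_from_rotor(rotor,lettre, coef):
--     pos_letter_alphabet = ALPHABET.index(lettre)
--     new_index = pos_letter_alphabet + coef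
--
--     if new_index >= len(rotor):
--        new_index = new_index - len(rotor)
--     return rotor[new_index]
--
-- def encode_letter(letter,coef):
--     letter= encode_letter_from_rotor(ROTOR1,letter, coef[0])
--     letter = encode_letter_from_rotor(ROTOR2, letter,coef[1])
--     letter = encode_letter_from_rotor(ROTOR3,letter,coef[2])
--
--
--     return letter
--
-- def turn_rotors(rotors_coef):
--     ctp = 0
--     while ctp < len(rotors_coef):
--         if rotors_coef[ctp] +1 < 26:
--             rotors_coef[ctp]+=1
--             break
--         else:
--             rotors_coef[ctp]=0
--             ctp += 1
--
--     return rotors_coef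
--
-- def encode_rotor(texte, coefs_initiaux):
--
--     new_text = " "
--     ctp = 0
--     while ctp < len(texte):
--         coefs_initiaux = turn_rotors(coefs_initiaux)
--         if texte[ctp]== " ":
--             new_text += " "
--         else:
--             new_text += encode_letter(texte[ctp] ,coefs_initiaux)
--         ctp += 1
--
--     return new_text
-- ===== SOURCE B (Python) =====
-- ALPHABET = "ABCDEFGHIJKLMNOPQRSTUVWXYZ"
--
-- ROTOR1 = "EKMFLGDQVZNTOWYHXUSPAIBRCJ"
--
-- ROTOR2 = "AJDKSIRUXBLHWTMCQGZNPYFVOE"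
--
-- ROTOR3 = "BDFHJLCPRTXVZNYEIWGAKMUSQO"
--
--
-- def _encode_char(ch, m):
--     # m is the rotor state packed as a base-26 integer, 0 <= m < 26**3.
--     l = ROTOR1[(ord(ch) - 65 + m) % 26]
--     l = ROTOR2[(ord(l) - 65 + m // 26) % 26]
--     return ROTOR3[(ord(l) - 65 + m // 676) % 26]
--
--
-- def encode_rotor(texte, coefs_initiaux):
--     # Pack the three rotor positions into one little-endian base-26 integer;
--     # the rotor state before encoding character number k (1-based) is then
--     # simply (n0 + k) mod 26**3.  No mutable odometer list is kept.
--     n0 = sum(c * 26 ** i for i, c in enumerate(coefs_initiaux[:3]))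
--     return ' ' + ''.join(
--         ' ' if ch == ' ' else _encode_char(ch, (n0 + k) % 17576)
--         for k, ch in enumerate(texte, 1))
-- ===== Notes on version B (the rewrite author's own statement) =====
-- stated objective: simpler
-- what changed: B packs the three rotor positions into one base-26 integer so the state before the k-th character is just (n0+k) mod 26^3, replacing A's mutable odometer list, its carry loop and the conditional index wrap-around by modular arithmetic in a single comprehension pass.
-- intended difference: On texts containing a letter with a first-three coefficient outside 0..25, A returns letters produced by Python's negative-index wrap-around and the odometer's silent clamping of an out-of-range digit to 0 mid-text (e.g. ' XA' on ('AB', [-3, 20, 5])) while B reads every coefficient canonically as a base-26 rotor position (' HB' there), the intended meaning of a rotor position. — e.g. on encode_rotor("AB", [-3, 20, 5]): A returns " XA", B returns " HB"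
-- outside the precondition, e.g. on encode_rotor('A', [0, 30, 5]): A returns ' W', B returns ' G'
import Mathlib
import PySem

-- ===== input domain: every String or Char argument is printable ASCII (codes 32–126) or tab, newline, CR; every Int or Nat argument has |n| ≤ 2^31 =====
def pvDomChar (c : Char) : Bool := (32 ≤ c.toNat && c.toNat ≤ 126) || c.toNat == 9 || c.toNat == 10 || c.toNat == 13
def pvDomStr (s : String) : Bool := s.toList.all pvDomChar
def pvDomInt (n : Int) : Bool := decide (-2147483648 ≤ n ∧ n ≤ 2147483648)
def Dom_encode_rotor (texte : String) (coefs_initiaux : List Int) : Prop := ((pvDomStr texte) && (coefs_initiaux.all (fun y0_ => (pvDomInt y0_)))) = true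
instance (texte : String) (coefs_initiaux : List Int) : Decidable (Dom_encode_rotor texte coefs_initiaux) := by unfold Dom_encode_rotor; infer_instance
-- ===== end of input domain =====

-- B replaces A's mutable base-26 odometer list and per-rotor index wrap-around by one packed
-- base-26 integer and modular arithmetic (return-value equivalence only: A also mutates
-- coefs_initiaux in place, B does not touch it).

-- ===== PORT A =====
def pvALPHA : List Char := "ABCDEFGHIJKLMNOPQRSTUVWXYZ".toList
def pvR1 : List Char := "EKMFLGDQVZNTOWYHXUSPAIBRCJ".toList
def pvR2 : List Char := "AJDKSIRUXBLHWTMCQGZNPYFVOE".toList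
def pvR3 : List Char := "BDFHJLCPRTXVZNYEIWGAKMUSQO".toList

-- ALPHABET.index raises ValueError when absent: none
def encode_letter_from_rotor (rotor : List Char) (lettre : Char) (coef : Int) : Option Char :=
  match PySem.List.index? pvALPHA lettre with
  | none => none
  | some pos =>
      let newIndex : Int := (pos : Int) + coef
      let newIndex : Int := if (rotor.length : Int) ≤ newIndex then newIndex - (rotor.length : Int) else newIndex
      PySem.List.pyGet? rotor newIndex

def encode_letter (letter : Char) (coef : List Int) : Option Char :=
  (PySem.List.pyGet? coef 0).bind fun c0 =>
  (encode_letter_from_rotor pvR1 letter c0).bind fun l1 =>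
  (PySem.List.pyGet? coef 1).bind fun c1 =>
  (encode_letter_from_rotor pvR2 l1 c1).bind fun l2 =>
  (PySem.List.pyGet? coef 2).bind fun c2 =>
  encode_letter_from_rotor pvR3 l2 c2

-- the while/ctp loop walks the list front to back, writing each visited cell:
-- ported as the structural recursion over the same cells (break = stop, else carry on)
def turn_rotorsAux : List Int → List Int
  | [] => []
  | v :: rest => if v + 1 < 26 then (v + 1) :: rest else 0 :: turn_rotorsAux rest

def turn_rotors (c : List Int) : List Int := turn_rotorsAux c

def encode_rotor_loop : List Char → List Int → List Char → Option (List Char)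
  | [], _, acc => some acc
  | ch :: rest, coefs, acc =>
    let coefs' := turn_rotors coefs
    if ch = ' ' then encode_rotor_loop rest coefs' (acc ++ [' '])
    else match encode_letter ch coefs' with
         | none => none
         | some l => encode_rotor_loop rest coefs' (acc ++ [l])

def encode_rotor (texte : String) (coefs_initiaux : List Int) : String :=
  match encode_rotor_loop texte.toList coefs_initiaux [' '] with
  | some cs => String.ofList cs
  | none => ""    -- a Python exception: outside Pre_

-- ===== PORT B =====
def pvEncodeChar (ch : Char) (m : Int) : Char :=
  let l := PySem.List.pyGetD pvR1 (PySem.Int.mod ((ch.toNat : Int) - 65 + m) 26) ' '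
  let l := PySem.List.pyGetD pvR2 (PySem.Int.mod ((l.toNat : Int) - 65 + PySem.Int.floordiv m 26) 26) ' '
  PySem.List.pyGetD pvR3 (PySem.Int.mod ((l.toNat : Int) - 65 + PySem.Int.floordiv m 676) 26) ' '

def encode_rotor_alt (texte : String) (coefs_initiaux : List Int) : String :=
  let n0 := (PySem.List.enumerate (coefs_initiaux.take 3) 0).foldl
              (fun acc p => acc + p.2 * 26 ^ p.1.toNat) 0
  String.ofList (' ' :: (PySem.List.enumerate texte.toList 1).map
    (fun p => if p.2 = ' ' then ' ' else pvEncodeChar p.2 (PySem.Int.mod (n0 + p.1) 17576)))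

-- ===== PRECONDITION & SPEC =====
-- Pre_ admits inputs on which A returns for every text: characters are spaces or uppercase
-- letters (others raise ValueError) and — unless the text is all spaces — at least three rotor
-- coefficients whose first three values keep every rotor index A computes inside Python's legal
-- [-26,25] window: first ≥ -27 and either second/third in -26..26, or first and second ≥ 25
-- (both clamp to 0 at the first turn) with the third ≥ 25 or in -26..26.  Outside these windows
-- A raises IndexError or returns a value depending on how long the text is (on a few short
-- texts A still returns there, see cites); such inputs are excluded.
def Pre_encode_rotor (texte : String) (coefs_initiaux : List Int) : Prop :=
  (texte.toList.all (fun ch => ch = ' ' || (65 ≤ ch.toNat && ch.toNat ≤ 90)) = true) ∧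
  ((texte.toList.all (fun ch => ch = ' ') = true) ∨
    (3 ≤ coefs_initiaux.length ∧ -27 ≤ coefs_initiaux.getD 0 0 ∧
      ((-26 ≤ coefs_initiaux.getD 1 0 ∧ coefs_initiaux.getD 1 0 ≤ 26 ∧
        -26 ≤ coefs_initiaux.getD 2 0 ∧ coefs_initiaux.getD 2 0 ≤ 26) ∨
       (25 ≤ coefs_initiaux.getD 0 0 ∧ 25 ≤ coefs_initiaux.getD 1 0 ∧
        (25 ≤ coefs_initiaux.getD 2 0 ∨
         (-26 ≤ coefs_initiaux.getD 2 0 ∧ coefs_initiaux.getD 2 0 ≤ 26))))))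

instance (texte : String) (coefs_initiaux : List Int) : Decidable (Pre_encode_rotor texte coefs_initiaux) := by
  unfold Pre_encode_rotor; infer_instance

def pvWitness_encode_rotor : String × List Int := ("AB C", [0, 25, 7])

-- On texts with a letter and a first-three coefficient outside 0..25, A returns letters produced
-- by Python's negative-index wrap-around and by the odometer silently clamping an out-of-range
-- digit to 0 mid-text, while B reads every coefficient canonically as a base-26 rotor position;
-- B's canonical reading is the intended meaning of a rotor position.
def D_encode_rotor (texte : String) (coefs_initiaux : List Int) : Prop :=
  (texte.toList.any (fun ch => ch != ' ') = true) ∧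
  ((coefs_initiaux.take 3).any (fun v => v < 0 || 25 < v) = true)

instance (texte : String) (coefs_initiaux : List Int) : Decidable (D_encode_rotor texte coefs_initiaux) := by
  unfold D_encode_rotor; infer_instance

def Spec_encode_rotor (texte : String) (coefs_initiaux : List Int) (out : String) : Prop := ¬ D_encode_rotor texte coefs_initiaux → out = encode_rotor_alt texte coefs_initiaux
instance (texte : String) (coefs_initiaux : List Int) (out : String) : Decidable (Spec_encode_rotor texte coefs_initiaux out) := by unfold Spec_encode_rotor; infer_instance

def pvDiffWitness_encode_rotor : String × List Int := ("AB", [-3, 20, 5])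
def pvDiffWitnessOut_encode_rotor : String × String := (" XA", " HB")

-- ===== CLAIM (what is proved, stated in full; the proofs are below) =====
def Claim_unchanged_encode_rotor : Prop := ∀ (texte : String) (coefs_initiaux : List Int), Dom_encode_rotor texte coefs_initiaux → Pre_encode_rotor texte coefs_initiaux → Spec_encode_rotor texte coefs_initiaux (encode_rotor texte coefs_initiaux)
def Claim_changed_encode_rotor : Prop := Dom_encode_rotor (pvDiffWitness_encode_rotor.1) (pvDiffWitness_encode_rotor.2) ∧ Pre_encode_rotor (pvDiffWitness_encode_rotor.1) (pvDiffWitness_encode_rotor.2) ∧ D_encode_rotor (pvDiffWitness_encode_rotor.1) (pvDiffWitness_encode_rotor.2) ∧ encode_rotor (pvDiffWitness_encode_rotor.1) (pvDiffWitness_encode_rotor.2) = pvDiffWitnessOut_encode_rotor.1 ∧ encode_rotor_alt (pvDiffWitness_encode_rotor.1) (pvDiffWitness_encode_rotor.2) = pvDiffWitnessOut_encode_rotor.2 ∧ pvDiffWitnessOut_encode_rotor.1 ≠ pvDiffWitnessOut_encode_rotor.2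

-- ===== LEMMAS AND PROOFS =====

def pvVal3 (c : List Int) : Int := c.getD 0 0 + 26 * c.getD 1 0 + 676 * c.getD 2 0

def pvInv (c : List Int) (m : Int) : Prop :=
  3 ≤ c.length ∧ (∀ i : Nat, i < 3 → 0 ≤ c.getD i 0 ∧ c.getD i 0 ≤ 25) ∧ pvVal3 c = m

theorem pv_turnAux_len (c : List Int) : (turn_rotorsAux c).length = c.length := by
  induction c with
  | nil => rfl
  | cons v rest ih =>
    rw [turn_rotorsAux]
    by_cases h : v + 1 < 26
    · rw [if_pos h]; simp
    · rw [if_neg h]; simp [ih]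

theorem pv_turn_step (c : List Int) (m : Int) (h : pvInv c m) (hm0 : 0 ≤ m) (hm : m < 17576) :
    pvInv (turn_rotors c) ((m + 1) % 17576) := by
  obtain ⟨hlen, hcanon, hval⟩ := h
  obtain ⟨a, b, d, t, rfl⟩ : ∃ a b d t, c = a :: b :: d :: t := by
    match c, hlen with
    | x :: y :: z :: t, _ => exact ⟨x, y, z, t, rfl⟩
  have ha := hcanon 0 (by omega)
  have hb := hcanon 1 (by omega)
  have hd := hcanon 2 (by omega)
  simp only [pvVal3, List.getD_cons_zero, List.getD_cons_succ] at hval ha hb hd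
  rw [turn_rotors, turn_rotorsAux]
  by_cases hA : a + 1 < 26
  · rw [if_pos hA]
    refine ⟨by simp, ?_, ?_⟩
    · intro i hi; interval_cases i <;> simp <;> omega
    · simp [pvVal3]; omega
  · rw [if_neg hA, turn_rotorsAux]
    by_cases hB : b + 1 < 26
    · rw [if_pos hB]
      refine ⟨by simp, ?_, ?_⟩
      · intro i hi; interval_cases i <;> simp <;> omega
      · simp [pvVal3]; omega
    · rw [if_neg hB, turn_rotorsAux]
      by_cases hD : d + 1 < 26
      · rw [if_pos hD]
        refine ⟨by simp, ?_, ?_⟩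
        · intro i hi; interval_cases i <;> simp <;> omega
        · simp [pvVal3]; omega
      · rw [if_neg hD]
        refine ⟨by simp [pv_turnAux_len], ?_, ?_⟩
        · intro i hi; interval_cases i <;> simp
        · simp [pvVal3]; omega

theorem pv_alpha_index (ch : Char) (h1 : 65 ≤ ch.toNat) (h2 : ch.toNat ≤ 90) :
    PySem.List.index? pvALPHA ch = some (ch.toNat - 65) := by
  obtain ⟨n, hn, rfl⟩ : ∃ n, (65 ≤ n ∧ n ≤ 90) ∧ ch = Char.ofNat n :=
    ⟨ch.toNat, ⟨h1, h2⟩, (Char.ofNat_toNat ch).symm⟩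
  obtain ⟨hn1, hn2⟩ := hn
  interval_cases n <;> decide

theorem pv_pyGet_getD (xs : List Char) (i : Int) (h0 : 0 ≤ i) (hlt : i < (xs.length : Int)) :
    PySem.List.pyGet? xs i = some (xs.getD i.toNat ' ') := by
  rw [PySem.List.pyGet?_of_nonneg _ h0, List.getElem?_eq_getElem (by omega),
      List.getD_eq_getElem _ _ (by omega)]

theorem pv_pyGetD_getD (xs : List Char) (i : Int) (h0 : 0 ≤ i) (hlt : i < (xs.length : Int)) :
    PySem.List.pyGetD xs i ' ' = xs.getD i.toNat ' ' := by
  rw [PySem.List.pyGetD_eq_getElem _ _ h0 (by omega), List.getD_eq_getElem _ _ (by omega)]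

theorem pv_stage (rotor : List Char) (hr : rotor.length = 26) (ch : Char)
    (h1 : 65 ≤ ch.toNat) (h2 : ch.toNat ≤ 90) (coef x : Int)
    (hc0 : 0 ≤ coef) (hc1 : coef ≤ 25) (hx : x % 26 = coef) :
    encode_letter_from_rotor rotor ch coef =
      some (PySem.List.pyGetD rotor (PySem.Int.mod ((ch.toNat : Int) - 65 + x) 26) ' ') := by
  rw [encode_letter_from_rotor, pv_alpha_index ch h1 h2]
  rw [PySem.Int.mod_eq_emod_of_pos (by norm_num)]
  have hpos : ((ch.toNat - 65 : Nat) : Int) = (ch.toNat : Int) - 65 := by omega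
  simp only [hpos, hr]
  push_cast
  set p : Int := (ch.toNat : Int) - 65 with hp
  have hpb : 0 ≤ p ∧ p ≤ 25 := by omega
  have hB : PySem.List.pyGetD rotor ((p + x) % 26) ' ' = rotor.getD ((p + x) % 26).toNat ' ' := by
    rw [pv_pyGetD_getD _ _ (by omega) (by rw [hr]; omega)]
  rw [hB]
  by_cases hbig : (26 : Int) ≤ p + coef
  · rw [if_pos hbig, pv_pyGet_getD _ _ (by omega) (by rw [hr]; omega)]
    rw [show (p + coef - 26).toNat = ((p + x) % 26).toNat from by omega]
  · rw [if_neg hbig, pv_pyGet_getD _ _ (by omega) (by rw [hr]; omega)]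
    rw [show (p + coef).toNat = ((p + x) % 26).toNat from by omega]

theorem pv_rotor_upper (rotor : List Char)
    (hrot : rotor = pvR1 ∨ rotor = pvR2 ∨ rotor = pvR3) (i : Nat) (hi : i < 26) :
    65 ≤ (rotor.getD i ' ').toNat ∧ (rotor.getD i ' ').toNat ≤ 90 := by
  rcases hrot with rfl | rfl | rfl <;> interval_cases i <;> decide

theorem pv_enc_char_eq (ch : Char) (h1 : 65 ≤ ch.toNat) (h2 : ch.toNat ≤ 90)
    (c : List Int) (m : Int) (hInv : pvInv c m) (hm0 : 0 ≤ m) (hm : m < 17576) :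
    encode_letter ch c = some (pvEncodeChar ch m) := by
  obtain ⟨hlen, hcanon, hval⟩ := hInv
  obtain ⟨a, b, d, t, rfl⟩ : ∃ a b d t, c = a :: b :: d :: t := by
    match c, hlen with
    | x :: y :: z :: t, _ => exact ⟨x, y, z, t, rfl⟩
  have ha := hcanon 0 (by omega)
  have hb := hcanon 1 (by omega)
  have hd := hcanon 2 (by omega)
  simp only [pvVal3, List.getD_cons_zero, List.getD_cons_succ] at hval ha hb hd
  have g0 : PySem.List.pyGet? (a :: b :: d :: t) 0 = some a := PySem.List.pyGet?_zero_cons a (b :: d :: t)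
  have g1 : PySem.List.pyGet? (a :: b :: d :: t) 1 = some b := by
    rw [PySem.List.pyGet?_of_nonneg _ (by omega)]; norm_num
  have g2 : PySem.List.pyGet? (a :: b :: d :: t) 2 = some d := by
    rw [PySem.List.pyGet?_of_nonneg _ (by omega)]
    rw [show (2 : Int).toNat = 2 from rfl]; rfl
  have hr1 : pvR1.length = 26 := by decide
  have hr2 : pvR2.length = 26 := by decide
  have hr3 : pvR3.length = 26 := by decide
  rw [encode_letter, g0, Option.bind_some]
  rw [pv_stage pvR1 hr1 ch h1 h2 a m ha.1 ha.2 (by omega), Option.bind_some]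
  rw [g1, Option.bind_some]
  -- the intermediate letters are elements of the rotors, hence uppercase
  have m26v : PySem.Int.floordiv m 26 % 26 = b := by
    rw [PySem.Int.floordiv_eq_ediv_of_pos (by norm_num)]; omega
  have m676v : PySem.Int.floordiv m 676 % 26 = d := by
    rw [PySem.Int.floordiv_eq_ediv_of_pos (by norm_num)]; omega
  have hl1 : PySem.List.pyGetD pvR1 (PySem.Int.mod ((ch.toNat : Int) - 65 + m) 26) ' '
      = pvR1.getD (PySem.Int.mod ((ch.toNat : Int) - 65 + m) 26).toNat ' ' := by
    rw [PySem.Int.mod_eq_emod_of_pos (by norm_num)]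
    exact pv_pyGetD_getD _ _ (by omega) (by rw [hr1]; omega)
  have hu1 := pv_rotor_upper pvR1 (Or.inl rfl)
      (PySem.Int.mod ((ch.toNat : Int) - 65 + m) 26).toNat
      (by rw [PySem.Int.mod_eq_emod_of_pos (by norm_num)]; omega)
  rw [pv_stage pvR2 hr2 _ (by rw [hl1]; exact hu1.1) (by rw [hl1]; exact hu1.2)
        b (PySem.Int.floordiv m 26) hb.1 hb.2 m26v, Option.bind_some]
  rw [g2, Option.bind_some]
  have hl2 : PySem.List.pyGetD pvR2 (PySem.Int.mod
        (((PySem.List.pyGetD pvR1 (PySem.Int.mod ((ch.toNat : Int) - 65 + m) 26) ' ').toNat : Int) - 65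
          + PySem.Int.floordiv m 26) 26) ' '
      = pvR2.getD (PySem.Int.mod
        (((PySem.List.pyGetD pvR1 (PySem.Int.mod ((ch.toNat : Int) - 65 + m) 26) ' ').toNat : Int) - 65
          + PySem.Int.floordiv m 26) 26).toNat ' ' := by
    rw [PySem.Int.mod_eq_emod_of_pos (by norm_num)]
    exact pv_pyGetD_getD _ _ (by omega) (by rw [hr2]; omega)
  have hu2 := pv_rotor_upper pvR2 (Or.inr (Or.inl rfl)) _
      (by rw [PySem.Int.mod_eq_emod_of_pos (by norm_num)]; omega :
        (PySem.Int.mod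
        (((PySem.List.pyGetD pvR1 (PySem.Int.mod ((ch.toNat : Int) - 65 + m) 26) ' ').toNat : Int) - 65
          + PySem.Int.floordiv m 26) 26).toNat < 26)
  rw [pv_stage pvR3 hr3 _ (by rw [hl2]; exact hu2.1) (by rw [hl2]; exact hu2.2)
        d (PySem.Int.floordiv m 676) hd.1 hd.2 m676v]
  rfl

theorem pv_loop_eq (chars : List Char) (c : List Int) (n0 : Int) (k : Int) (acc : List Char)
    (hch : ∀ ch ∈ chars, ch = ' ' ∨ (65 ≤ ch.toNat ∧ ch.toNat ≤ 90))
    (hInv : pvInv c ((n0 + k) % 17576)) :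
    encode_rotor_loop chars c acc =
      some (acc ++ (PySem.List.enumerate chars (k + 1)).map
        (fun p => if p.2 = ' ' then ' ' else pvEncodeChar p.2 (PySem.Int.mod (n0 + p.1) 17576))) := by
  induction chars generalizing c k acc with
  | nil => simp [encode_rotor_loop]
  | cons ch rest ih =>
    have hstep := pv_turn_step c _ hInv (by omega) (by omega)
    rw [show ((n0 + k) % 17576 + 1) % 17576 = (n0 + (k + 1)) % 17576 from by omega] at hstep
    rw [PySem.List.enumerate_cons, List.map_cons]
    simp only [encode_rotor_loop]
    rcases hch ch (List.mem_cons_self) with hsp | hup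
    · subst hsp
      rw [if_pos rfl, if_pos rfl,
          ih _ (k + 1) _ (fun x hx => hch x (List.mem_cons_of_mem _ hx)) hstep]
      simp
    · have hne : ¬ ch = ' ' := by
        intro e; subst e; exact absurd hup.1 (by decide)
      rw [if_neg hne, if_neg hne]
      rw [pv_enc_char_eq ch hup.1 hup.2 _ _ hstep (by omega) (by omega)]
      rw [PySem.Int.mod_eq_emod_of_pos (by norm_num : (0:Int) < 17576)]
      show encode_rotor_loop rest (turn_rotors c)
          (acc ++ [pvEncodeChar ch ((n0 + (k + 1)) % 17576)]) = _
      rw [ih _ (k + 1) _ (fun x hx => hch x (List.mem_cons_of_mem _ hx)) hstep]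
      simp

theorem pv_loop_spaces (chars : List Char) (c : List Int) (acc : List Char)
    (h : ∀ ch ∈ chars, ch = ' ') :
    encode_rotor_loop chars c acc = some (acc ++ chars) := by
  induction chars generalizing c acc with
  | nil => simp [encode_rotor_loop]
  | cons ch rest ih =>
    have hc := h ch (List.mem_cons_self)
    subst hc
    simp only [encode_rotor_loop, if_pos]
    rw [ih _ _ (fun x hx => h x (List.mem_cons_of_mem _ hx))]
    simp

theorem pv_map_spaces (chars : List Char) (s : Int) (g : Int × Char → Char)
    (h : ∀ ch ∈ chars, ch = ' ') :
    (PySem.List.enumerate chars s).map (fun p => if p.2 = ' ' then ' ' else g p) = chars := by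
  induction chars generalizing s with
  | nil => simp [PySem.List.enumerate]
  | cons ch rest ih =>
    have hc := h ch (List.mem_cons_self)
    subst hc
    rw [PySem.List.enumerate_cons, List.map_cons,
        ih (s + 1) (fun x hx => h x (List.mem_cons_of_mem _ hx))]
    simp

-- ===== VERDICT (by name: the statement is the Claim_ definition above) =====
theorem pv_take3_fold (c : List Int) (hlen : 3 ≤ c.length) :
    (PySem.List.enumerate (c.take 3) 0).foldl (fun acc p => acc + p.2 * 26 ^ p.1.toNat) 0
      = pvVal3 c := by
  obtain ⟨a, b, d, t, rfl⟩ : ∃ a b d t, c = a :: b :: d :: t := by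
    match c, hlen with
    | x :: y :: z :: t, _ => exact ⟨x, y, z, t, rfl⟩
  simp [PySem.List.enumerate_cons, PySem.List.enumerate, pvVal3, List.foldl]
  ring

theorem encode_rotor_spec : Claim_unchanged_encode_rotor := by
  intro texte coefs hDom hPre hnD
  obtain ⟨hchB, hrestB⟩ := hPre
  have hch : ∀ ch ∈ texte.toList, ch = ' ' ∨ (65 ≤ ch.toNat ∧ ch.toNat ≤ 90) := by
    intro x hx; simpa using List.all_eq_true.mp hchB x hx
  simp only [encode_rotor_alt]
  by_cases hspB : texte.toList.all (fun ch => ch = ' ') = true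
  · have hsp : ∀ ch ∈ texte.toList, ch = ' ' := by
      intro x hx; simpa using List.all_eq_true.mp hspB x hx
    rw [encode_rotor, pv_loop_spaces _ _ _ hsp, pv_map_spaces _ _ _ hsp]
    rfl
  · obtain ⟨hl, -⟩ : 3 ≤ coefs.length ∧ _ := hrestB.resolve_left hspB
    have hany : texte.toList.any (fun ch => ch != ' ') = true := by
      simp only [List.all_eq_true] at hspB
      push Not at hspB
      obtain ⟨x, hx, hxne⟩ := hspB
      simp only [List.any_eq_true]
      exact ⟨x, hx, by simpa using hxne⟩
    have hcanonB : ¬ ((coefs.take 3).any (fun v => v < 0 || 25 < v) = true) := by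
      intro hbad; exact hnD ⟨hany, hbad⟩
    have hc : ∀ i : Nat, i < 3 → 0 ≤ coefs.getD i 0 ∧ coefs.getD i 0 ≤ 25 := by
      obtain ⟨a, b, d, t, rfl⟩ : ∃ a b d t, coefs = a :: b :: d :: t := by
        match coefs, hl with
        | x :: y :: z :: t, _ => exact ⟨x, y, z, t, rfl⟩
      simp only [List.take, List.any_cons, List.any_nil, Bool.or_eq_true, decide_eq_true_eq,
        not_or] at hcanonB
      intro i hi; interval_cases i <;> simp <;> omega
    have hInv : pvInv coefs ((pvVal3 coefs + 0) % 17576) :=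
      ⟨hl, hc, by
        have h0 := hc 0 (by omega); have h1 := hc 1 (by omega); have h2 := hc 2 (by omega)
        unfold pvVal3 at *; omega⟩
    rw [encode_rotor, pv_loop_eq texte.toList coefs (pvVal3 coefs) 0 [' '] hch hInv]
    rw [pv_take3_fold coefs hl]
    norm_num

theorem encode_rotor_changed : Claim_changed_encode_rotor := by
  unfold Claim_changed_encode_rotor; decide
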